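-- pv_equiv track=rewrite | github.com/primitiv/primitiv | examples/encdec/utils.py | make_batch
-- ===== SOURCE A (Python) =====
-- def make_batch(corpus, sent_ids, vocab):
--     batch_size = len(sent_ids)
--     eos_id = vocab["<eos>"]
--     max_len = 0
--     for sid in sent_ids:
--         max_len = max(max_len, len(corpus[sid]))
--     batch = [[eos_id] * batch_size for i in range(max_len)]
--     for i in range(batch_size):
--         sent = corpus[sent_ids[i]]
--         for j in range(len(sent)):
--             batch[j][i] = sent[j]
--     return batch
-- ===== SOURCE B (Python) =====
-- def make_batch(corpus, sent_ids, vocab):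
--     eos_id = vocab["<eos>"]
--     rows = []  # transposed batch built so far; each row has one entry per sentence merged
--     k = 0      # number of sentences merged so far
--     for sid in sent_ids:
--         sent = corpus[sid]
--         for j, row in enumerate(rows):
--             row.append(sent[j] if j < len(sent) else eos_id)
--         for j in range(len(rows), len(sent)):
--             rows.append([eos_id] * k + [sent[j]])
--         k += 1
--     return rows
-- ===== Notes on version B (the rewrite author's own statement) =====
-- stated objective: alternative
-- what changed: Replaces A's max-length pre-scan plus prefilled eos matrix with overwrite loops by a single incremental pass that merges each sentence into the accumulated transposed rows (appending to existing rows and creating fresh padded rows for extra positions).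
import Mathlib
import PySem

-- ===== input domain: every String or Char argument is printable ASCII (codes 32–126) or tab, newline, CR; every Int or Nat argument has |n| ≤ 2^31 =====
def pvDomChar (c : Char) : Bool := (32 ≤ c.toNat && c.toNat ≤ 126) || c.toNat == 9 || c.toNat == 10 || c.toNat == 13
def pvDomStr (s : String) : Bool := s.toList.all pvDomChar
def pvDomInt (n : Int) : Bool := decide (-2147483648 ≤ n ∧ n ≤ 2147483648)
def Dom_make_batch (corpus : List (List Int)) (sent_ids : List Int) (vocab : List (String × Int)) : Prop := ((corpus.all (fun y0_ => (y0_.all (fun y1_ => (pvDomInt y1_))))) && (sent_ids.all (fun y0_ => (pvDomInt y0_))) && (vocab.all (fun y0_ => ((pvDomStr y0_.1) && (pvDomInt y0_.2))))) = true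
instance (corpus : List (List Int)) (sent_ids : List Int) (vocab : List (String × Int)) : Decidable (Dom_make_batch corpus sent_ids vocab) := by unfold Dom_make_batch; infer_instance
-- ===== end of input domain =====

-- ===== PORT A =====
-- B replaces A's max-length pre-scan + prefilled eos matrix + overwrite loops by a single
-- incremental pass that merges each sentence into the accumulated transposed rows (alternative).
def make_batch (corpus : List (List Int)) (sent_ids : List Int) (vocab : List (String × Int)) : List (List Int) :=
  let batch_size := sent_ids.length
  let eos_id := ((PySem.Dict.mk vocab).get? "<eos>").getD 0
  let max_len := sent_ids.foldl (fun m sid => max m (PySem.List.pyGetD corpus sid []).length) 0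
  let batch := (List.range max_len).map (fun _ => List.replicate batch_size eos_id)
  (List.range batch_size).foldl (fun batch i =>
    let sent := PySem.List.pyGetD corpus (sent_ids.getD i 0) []
    (List.range sent.length).foldl
      (fun b j => b.set j ((b.getD j []).set i (sent.getD j 0))) batch) batch

-- ===== PORT B =====
-- loop body of B's single pass: extend every existing row with this sentence's entry
-- (eos when the sentence is shorter), then append fresh rows for its extra positions
def mbStep (eos : Int) (acc : List (List Int) × Nat) (sent : List Int) : List (List Int) × Nat :=
  let rows := acc.1
  let k := acc.2
  let extended := rows.mapIdx (fun j row => row ++ [if j < sent.length then sent.getD j 0 else eos])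
  let fresh := (List.range' rows.length (sent.length - rows.length)).map
      (fun j => List.replicate k eos ++ [sent.getD j 0])
  (extended ++ fresh, k + 1)

def make_batch_alt (corpus : List (List Int)) (sent_ids : List Int) (vocab : List (String × Int)) : List (List Int) :=
  let eos_id := ((PySem.Dict.mk vocab).get? "<eos>").getD 0
  (sent_ids.foldl (fun acc sid => mbStep eos_id acc (PySem.List.pyGetD corpus sid [])) ([], 0)).1

-- ===== PRECONDITION & SPEC =====
-- Pre_ excludes exactly the inputs where Python A raises: a vocab without the "<eos>" key
-- (KeyError) or a sentence id out of range of corpus (IndexError).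
def Pre_make_batch (corpus : List (List Int)) (sent_ids : List Int) (vocab : List (String × Int)) : Prop :=
  "<eos>" ∈ vocab.map Prod.fst ∧ ∀ sid ∈ sent_ids, PySem.Raise.InRange corpus.length sid
instance (corpus : List (List Int)) (sent_ids : List Int) (vocab : List (String × Int)) : Decidable (Pre_make_batch corpus sent_ids vocab) := by unfold Pre_make_batch; infer_instance

def pvWitness_make_batch : List (List Int) × List Int × (List (String × Int)) :=
  ([[1, 2], [3]], [0, 1, 0], [("<eos>", 9)])

def Spec_make_batch (corpus : List (List Int)) (sent_ids : List Int) (vocab : List (String × Int)) (out : List (List Int)) : Prop := out = make_batch_alt corpus sent_ids vocab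
instance (corpus : List (List Int)) (sent_ids : List Int) (vocab : List (String × Int)) (out : List (List Int)) : Decidable (Spec_make_batch corpus sent_ids vocab out) := by unfold Spec_make_batch; infer_instance

-- ===== CLAIM (what is proved, stated in full; the proofs are below) =====
def Claim_equal_make_batch : Prop := ∀ (corpus : List (List Int)) (sent_ids : List Int) (vocab : List (String × Int)), Dom_make_batch corpus sent_ids vocab → Pre_make_batch corpus sent_ids vocab → Spec_make_batch corpus sent_ids vocab (make_batch corpus sent_ids vocab)

-- ===== LEMMAS AND PROOFS =====

theorem mb_getD_map_range {β : Type} [Inhabited β] (m L : Nat) (g : Nat → β) (d : β)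
    (h : L < m) : (((List.range m).map g).getD L d) = g L := by
  rw [List.getD_eq_getElem _ _ (by simpa using h)]
  simp

theorem mb_set_map_range {β : Type} (m L : Nat) (g : Nat → β) (v : β) :
    ((List.range m).map g).set L v = (List.range m).map (fun j => if j = L then v else g j) := by
  apply List.ext_getElem
  · simp
  · intro k h1 h2
    simp only [List.getElem_set, List.getElem_map, List.getElem_range]
    by_cases hk : L = k
    · simp [hk]
    · simp [hk, Ne.symm hk]

theorem mb_set_append_cons (as : List Int) (b : Int) (bs : List Int) (v : Int)
    (n : Nat) (hn : n = as.length) :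
    (as ++ b :: bs).set n v = as ++ v :: bs := by
  subst hn
  induction as with
  | nil => simp
  | cons a as ih => simp [ih]

theorem mb_inner_fold (L m i : Nat) (sent : List Int) (f : Nat → List Int) (h : L ≤ m) :
    (List.range L).foldl (fun b j => b.set j ((b.getD j []).set i (sent.getD j 0)))
        ((List.range m).map f)
      = (List.range m).map (fun j => if j < L then (f j).set i (sent.getD j 0) else f j) := by
  induction L with
  | zero =>
    simp
  | succ L ih =>
    rw [List.range_succ, List.foldl_append, ih (by omega)]
    simp only [List.foldl_cons, List.foldl_nil]
    rw [mb_getD_map_range m L _ [] (by omega)]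
    rw [if_neg (lt_irrefl L)]
    rw [mb_set_map_range]
    apply List.map_congr_left
    intro j hj
    by_cases h1 : j = L
    · subst h1
      rw [if_pos rfl, if_pos (by omega)]
    · rw [if_neg h1]
      by_cases h2 : j < L
      · rw [if_pos h2, if_pos (by omega)]
      · rw [if_neg h2, if_neg (by omega)]

theorem mb_outer_fold (sents : List (List Int)) (eos : Int) (i : Nat)
    (hi : i ≤ sents.length) :
    (List.range i).foldl (fun batch i' =>
        (List.range (sents.getD i' []).length).foldl
          (fun b j => b.set j ((b.getD j []).set i' ((sents.getD i' []).getD j 0))) batch)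
      ((List.range (sents.foldl (fun a s => max a s.length) 0)).map
        (fun _ => List.replicate sents.length eos))
      = (List.range (sents.foldl (fun a s => max a s.length) 0)).map
          (fun j => (sents.take i).map (fun s => s.getD j eos)
              ++ List.replicate (sents.length - i) eos) := by
  induction i with
  | zero => simp
  | succ i ih =>
    have hi' : i < sents.length := by omega
    set m := sents.foldl (fun a s => max a s.length) 0 with hm
    rw [List.range_succ, List.foldl_append, ih (by omega)]
    simp only [List.foldl_cons, List.foldl_nil]
    have hgd : sents.getD i [] = sents[i] := List.getD_eq_getElem sents [] hi'
    have hL : (sents.getD i []).length ≤ m := by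
      rw [hgd]
      exact (PySem.List.le_foldl_max_nat sents List.length 0).2 _ (List.getElem_mem hi')
    rw [mb_inner_fold _ m i _ _ hL]
    apply List.map_congr_left
    intro j hj
    rw [List.mem_range] at hj
    have hlenpre : i = ((sents.take i).map (fun s => s.getD j eos)).length := by
      simp [List.length_take, Nat.min_eq_left (le_of_lt hi')]
    have hrep : List.replicate (sents.length - i) eos
        = eos :: List.replicate (sents.length - (i + 1)) eos := by
      have h9 : sents.length - i = (sents.length - (i + 1)) + 1 := by omega
      rw [h9, List.replicate_succ]
    have htake : sents.take (i + 1) = sents.take i ++ [sents[i]] := by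
      rw [List.take_add_one]
      simp [List.getElem?_eq_getElem hi']
    rw [htake, List.map_append]
    by_cases hc : j < (sents.getD i []).length
    · rw [if_pos hc, hrep, mb_set_append_cons _ _ _ _ _ hlenpre]
      have hv : (sents.getD i []).getD j 0 = sents[i].getD j eos := by
        rw [hgd] at hc ⊢
        rw [List.getD_eq_getElem _ _ hc, List.getD_eq_getElem _ _ hc]
      simp only [List.map_cons, List.map_nil, List.singleton_append, List.append_assoc]
      rw [hv]
    · rw [if_neg hc, hrep]
      have hv : sents[i].getD j eos = eos := by
        apply List.getD_eq_default
        rw [hgd] at hc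
        omega
      simp only [List.map_cons, List.map_nil, List.singleton_append, List.append_assoc]
      rw [hv]

theorem mb_portA (corpus : List (List Int)) (sent_ids : List Int) (eos : Int) :
    (List.range sent_ids.length).foldl (fun batch i =>
        (List.range (PySem.List.pyGetD corpus (sent_ids.getD i 0) []).length).foldl
          (fun b j => b.set j ((b.getD j []).set i
            ((PySem.List.pyGetD corpus (sent_ids.getD i 0) []).getD j 0))) batch)
      ((List.range (sent_ids.foldl
          (fun m sid => max m (PySem.List.pyGetD corpus sid []).length) 0)).map
        (fun _ => List.replicate sent_ids.length eos))
    = (List.range ((sent_ids.map (fun sid => PySem.List.pyGetD corpus sid [])).foldl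
          (fun a s => max a s.length) 0)).map
        (fun j => (sent_ids.map (fun sid => PySem.List.pyGetD corpus sid [])).map
          (fun s => s.getD j eos)) := by
  set sents := sent_ids.map (fun sid => PySem.List.pyGetD corpus sid []) with hsents
  have hbs : sent_ids.length = sents.length := by simp [hsents]
  have hmax : sent_ids.foldl (fun m sid => max m (PySem.List.pyGetD corpus sid []).length) 0
      = sents.foldl (fun a s => max a s.length) 0 := by
    rw [hsents, List.foldl_map]
  rw [hmax, hbs]
  refine Eq.trans (PySem.List.foldl_congr_mem _ _ _ _ ?_)
    (Eq.trans (mb_outer_fold sents eos sents.length (le_refl _)) ?_)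
  · intro acc i hi
    rw [List.mem_range] at hi
    have hi2 : i < sent_ids.length := by omega
    have hsid : PySem.List.pyGetD corpus (sent_ids.getD i 0) [] = sents.getD i [] := by
      rw [List.getD_eq_getElem sent_ids 0 hi2, List.getD_eq_getElem sents [] hi]
      simp [hsents]
    rw [hsid]
  · simp

theorem mb_mapIdx_map_range {β γ : Type} (n : Nat) (g : Nat → β) (h : Nat → β → γ) :
    ((List.range n).map g).mapIdx h = (List.range n).map (fun j => h j (g j)) := by
  apply List.ext_getElem
  · simp
  · intro k h1 h2
    simp

theorem mb_portB (eos : Int) (sents : List (List Int)) :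
    sents.foldl (mbStep eos) ([], 0)
      = ((List.range (sents.foldl (fun a s => max a s.length) 0)).map
          (fun j => sents.map (fun s => s.getD j eos)), sents.length) := by
  induction sents using List.reverseRecOn with
  | nil => simp
  | append_singleton ts s ih =>
    rw [List.foldl_append, ih]
    simp only [List.foldl_cons, List.foldl_nil]
    set m := ts.foldl (fun a s => max a s.length) 0 with hm
    have hmax : (ts ++ [s]).foldl (fun a s => max a s.length) 0 = max m s.length := by
      rw [List.foldl_append, ← hm]; simp
    have hlen : ∀ t ∈ ts, t.length ≤ m :=
      (PySem.List.le_foldl_max_nat ts List.length 0).2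
    unfold mbStep
    simp only [List.length_map, List.length_range, List.length_append, List.length_cons,
      List.length_nil]
    rw [mb_mapIdx_map_range]
    refine Prod.ext ?_ (by simp)
    show _ ++ _ = _
    have hcanon : ∀ j : Nat,
        (ts ++ [s]).map (fun t => t.getD j eos)
          = ts.map (fun t => t.getD j eos) ++ [s.getD j eos] := by
      intro j; simp
    have h1 : (List.range m).map
        (fun j => ts.map (fun t => t.getD j eos)
          ++ [if j < s.length then s.getD j 0 else eos])
        = (List.range m).map (fun j => (ts ++ [s]).map (fun t => t.getD j eos)) := by
      apply List.map_congr_left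
      intro j _
      rw [hcanon]
      by_cases hc : j < s.length
      · rw [if_pos hc, List.getD_eq_getElem _ _ hc, List.getD_eq_getElem _ _ hc]
      · rw [if_neg hc, List.getD_eq_default _ _ (by omega)]
    have h2 : (List.range' m (s.length - m)).map
        (fun j => List.replicate ts.length eos ++ [s.getD j 0])
        = (List.range' m (s.length - m)).map
            (fun j => (ts ++ [s]).map (fun t => t.getD j eos)) := by
      apply List.map_congr_left
      intro j hj
      rw [List.mem_range'] at hj
      obtain ⟨i, hi, hji⟩ := hj
      have hmj : m ≤ j := by omega
      have hjs : j < s.length := by omega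
      rw [hcanon]
      have hpre : ts.map (fun t => t.getD j eos) = List.replicate ts.length eos := by
        rw [List.eq_replicate_iff]
        constructor
        · simp
        · intro b hb
          rw [List.mem_map] at hb
          obtain ⟨t, ht, hbt⟩ := hb
          rw [← hbt]
          exact List.getD_eq_default _ _ (by have := hlen t ht; omega)
      rw [hpre, List.getD_eq_getElem _ _ hjs, List.getD_eq_getElem _ _ hjs]
    have hr : List.range m ++ List.range' m (s.length - m) = List.range (max m s.length) := by
      have hc : m + (s.length - m) = max m s.length := by omega
      rw [(List.range_eq_range' : List.range m = _), (List.range_eq_range' : List.range (max m s.length) = _), ← hc,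
        ← List.range'_append]
      simp
    rw [h1, h2, ← List.map_append, hr, hmax]

-- ===== VERDICT (by name: the statement is the Claim_ definition above) =====
theorem make_batch_spec : Claim_equal_make_batch := by
  intro corpus sent_ids vocab _ _
  unfold Spec_make_batch
  simp only [make_batch, make_batch_alt]
  rw [mb_portA corpus sent_ids]
  have hfold : sent_ids.foldl
      (fun acc sid => mbStep (((PySem.Dict.mk vocab).get? "<eos>").getD 0) acc
        (PySem.List.pyGetD corpus sid [])) ([], 0)
      = (sent_ids.map (fun sid => PySem.List.pyGetD corpus sid [])).foldl
          (mbStep (((PySem.Dict.mk vocab).get? "<eos>").getD 0)) ([], 0) := by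
    rw [List.foldl_map]
  rw [hfold, mb_portB]
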